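-- pv_equiv track=rewrite | github.com/polina944/performance-lab-nt | task1/task1.py | circular_path
-- ===== SOURCE A (Python) =====
-- def circular_path(n, m):
--     path = []
--     index = 0
--     for _ in range(n):
--         path.append((index % n) + 1)
--         index = (index + m) % n
--         if index == 0:
--             break
--     return ''.join(map(str, path))
-- ===== SOURCE B (Python) =====
-- def circular_path(n, m):
--     # closed form: the visited positions are k*m % n + 1 for k = 0..L-1,
--     # where L = n // gcd(n, m) is the orbit length of stepping by m on Z_n
--     if n <= 0:
--         return ''
--     a, b = n, m % n
--     while b:
--         a, b = b, a % b
--     return ''.join(str(k * m % n + 1) for k in range(n // a))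
-- ===== Notes on version B (the rewrite author's own statement) =====
-- stated objective: alternative
-- what changed: B replaces A's step-by-step simulation with break by a closed form: it computes the orbit length L = n // gcd(n, m % n) via Euclid's algorithm and emits each position directly as k*m % n + 1 for k in range(L).
import Mathlib
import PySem

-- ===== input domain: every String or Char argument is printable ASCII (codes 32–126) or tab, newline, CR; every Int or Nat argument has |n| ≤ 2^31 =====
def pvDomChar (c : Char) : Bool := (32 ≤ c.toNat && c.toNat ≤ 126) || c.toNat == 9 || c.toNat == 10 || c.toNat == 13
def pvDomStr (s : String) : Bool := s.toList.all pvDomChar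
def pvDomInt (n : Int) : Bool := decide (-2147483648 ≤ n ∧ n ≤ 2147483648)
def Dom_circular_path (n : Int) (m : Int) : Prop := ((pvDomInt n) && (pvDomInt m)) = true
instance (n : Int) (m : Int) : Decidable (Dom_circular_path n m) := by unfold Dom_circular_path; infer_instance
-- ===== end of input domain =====

-- B replaces A's simulation-with-break by computing the orbit length n // gcd(n, m % n)
-- up front (Euclid) and emitting each position as the closed form k*m % n + 1 (objective: alternative).

-- ===== PORT A =====
-- the for-loop of A: fuel = remaining iterations of 'for _ in range(n)', state (index, path)
def circPathGo (n m : Int) : Nat → Int → List Int → List Int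
  | 0, _, path => path
  | fuel + 1, index, path =>
    let path' := path ++ [PySem.Int.mod index n + 1]
    let index' := PySem.Int.mod (index + m) n
    if index' = 0 then path' else circPathGo n m fuel index' path'

def circular_path (n : Int) (m : Int) : String :=
  PySem.Str.join "" ((circPathGo n m n.toNat 0 []).map PySem.Int.toStr)

-- ===== PORT B =====
-- Euclid loop of Source B: 'while b: a, b = b, a % b'; terminates since |a % b| < |b|
def circEuclid (a b : Int) : Int :=
  if h : b ≠ 0 then circEuclid b (PySem.Int.mod a b) else a
termination_by b.natAbs
decreasing_by
  rcases lt_or_gt_of_ne h with hb | hb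
  · obtain ⟨h1, h2⟩ := PySem.Int.mod_neg_bounds a hb; omega
  · have h1 := PySem.Int.mod_nonneg a hb; have h2 := PySem.Int.mod_lt a hb; omega

def circular_path_alt (n : Int) (m : Int) : String :=
  if n ≤ 0 then ""
  else
    let g := circEuclid n (PySem.Int.mod m n)
    PySem.Str.join "" ((PySem.List.pyRange 0 (PySem.Int.floordiv n g) 1).map
      (fun k => PySem.Int.toStr (PySem.Int.mod (k * m) n + 1)))

-- ===== PRECONDITION & SPEC =====
def Spec_circular_path (n : Int) (m : Int) (out : String) : Prop := out = circular_path_alt n m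
instance (n : Int) (m : Int) (out : String) : Decidable (Spec_circular_path n m out) := by unfold Spec_circular_path; infer_instance

-- ===== CLAIM (what is proved, stated in full; the proofs are below) =====
def Claim_equal_circular_path : Prop := ∀ (n : Int) (m : Int), Dom_circular_path n m → Spec_circular_path n m (circular_path n m)

-- ===== LEMMAS AND PROOFS =====

-- Euclid's loop computes the gcd on nonnegative arguments (fuel k bounds |b|)
theorem circEuclid_eq_gcd : ∀ (k : ℕ) (a b : Int), 0 ≤ a → 0 ≤ b → b.natAbs ≤ k →
    circEuclid a b = Int.gcd a b := by
  intro k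
  induction k with
  | zero =>
    intro a b ha hb hk
    have hb0 : b = 0 := by omega
    subst hb0
    rw [circEuclid]
    simp [Int.natAbs_of_nonneg ha]
  | succ k ih =>
    intro a b ha hb hk
    by_cases hb0 : b = 0
    · subst hb0; rw [circEuclid]; simp [Int.natAbs_of_nonneg ha]
    · have hbpos : 0 < b := lt_of_le_of_ne hb (Ne.symm hb0)
      rw [circEuclid, dif_pos hb0, PySem.Int.mod_eq_emod_of_pos hbpos]
      have h1 : 0 ≤ a % b := Int.emod_nonneg a hb0
      have h2 : a % b < b := Int.emod_lt_of_pos a hbpos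
      rw [ih b (a % b) hb h1 (by omega)]
      rw [Int.gcd_comm b (a % b), Int.gcd_emod a b]

-- core number theory: N ∣ t*M ↔ (N / gcd N M) ∣ t
theorem key_nat (N M t : ℕ) (hN : 0 < N) : N ∣ t * M ↔ N / Nat.gcd N M ∣ t := by
  set g := Nat.gcd N M with hgdef
  have hgpos : 0 < g := by
    have hne : g ≠ 0 := by
      intro h0
      rw [hgdef, Nat.gcd_eq_zero_iff] at h0
      omega
    omega
  have copd := Nat.coprime_div_gcd_div_gcd (m := N) (n := M) hgpos
  have hgN : g ∣ N := by rw [hgdef]; exact Nat.gcd_dvd_left N M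
  have hgM : g ∣ M := by rw [hgdef]; exact Nat.gcd_dvd_right N M
  obtain ⟨N', hN'⟩ := hgN
  obtain ⟨M', hM'⟩ := hgM
  have hNg : N / g = N' := by rw [hN']; exact Nat.mul_div_cancel_left N' hgpos
  have hMg : M / g = M' := by rw [hM']; exact Nat.mul_div_cancel_left M' hgpos
  have cop : Nat.Coprime N' M' := by rwa [hNg, hMg] at copd
  rw [hNg]
  constructor
  · intro h
    rcases h with ⟨c, hc⟩
    rw [hN', hM'] at hc
    have hcc : t * M' = N' * c := by
      have hgg : g * (t * M') = g * (N' * c) := by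
        calc g * (t * M') = t * (g * M') := by ring
          _ = g * N' * c := hc
          _ = g * (N' * c) := by ring
      exact Nat.eq_of_mul_eq_mul_left hgpos hgg
    exact cop.dvd_of_dvd_mul_right ⟨c, hcc⟩
  · rintro ⟨c, hc⟩
    refine ⟨c * M', ?_⟩
    rw [hN', hM', hc]
    ring

-- the same over ℤ, phrased for the loop index: (t*m) % n = 0 ↔ L ∣ t
theorem key_int (n m : Int) (hn : 0 < n) (t : ℕ) :
    ((t : Int) * m) % n = 0 ↔ (n.toNat / Int.gcd n m) ∣ t := by
  have h1 : ((t : Int) * m) % n = 0 ↔ n ∣ (t : Int) * m :=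
    ⟨Int.dvd_of_emod_eq_zero, Int.emod_eq_zero_of_dvd⟩
  rw [h1, ← Int.natAbs_dvd_natAbs]
  have h2 : ((t : Int) * m).natAbs = t * m.natAbs := by
    rw [Int.natAbs_mul]; simp
  have h3 : n.natAbs = n.toNat := by omega
  have h4 : Int.gcd n m = Nat.gcd n.toNat m.natAbs := by
    unfold Int.gcd; rw [h3]
  rw [h2, h3, h4]
  exact key_nat n.toNat m.natAbs t (by omega)

-- loop characterisation: starting from index = (j*m) % n with j < L, A's loop appends
-- exactly the positions for j, j+1, …, L-1 and then breaks
theorem circPathGo_eq (n m : Int) (hn : 0 < n) (L : ℕ) (hL : L = n.toNat / Int.gcd n m) :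
    ∀ (f : ℕ), ∀ (j : ℕ) (p : List Int), j < L → L - j ≤ f →
      circPathGo n m f (((j : Int) * m) % n) p
        = p ++ (List.range (L - j)).map (fun k => (((j + k : ℕ) : Int) * m) % n + 1) := by
  intro f
  induction f with
  | zero => intro j p hj hf; omega
  | succ f ih =>
    intro j p hj hf
    simp only [circPathGo]
    rw [PySem.Int.mod_eq_emod_of_pos hn, PySem.Int.mod_eq_emod_of_pos hn]
    have hself : (((j : Int) * m) % n) % n = ((j : Int) * m) % n :=
      Int.emod_emod_of_dvd _ dvd_rfl
    have hidx : (((j : Int) * m) % n + m) % n = (((j + 1 : ℕ) : Int) * m) % n := by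
      rw [Int.emod_add_emod]
      congr 1
      push_cast
      ring
    rw [hself, hidx]
    by_cases hend : j + 1 = L
    · have hcond : ((((j + 1 : ℕ)) : Int) * m) % n = 0 := by
        rw [key_int n m hn (j + 1), ← hL, hend]
      rw [if_pos hcond]
      have : L - j = 1 := by omega
      rw [this]
      simp
    · have hj1 : j + 1 < L := by omega
      have hcond : ¬ ((((j + 1 : ℕ)) : Int) * m) % n = 0 := by
        rw [key_int n m hn (j + 1), ← hL]
        intro hdvd
        have := Nat.le_of_dvd (by omega) hdvd
        omega
      rw [if_neg hcond]
      rw [ih (j + 1) (p ++ [((j : Int) * m) % n + 1]) hj1 (by omega)]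
      rw [List.append_assoc]
      congr 1
      have hs : L - j = (L - (j + 1)) + 1 := by omega
      rw [hs, List.range_succ_eq_map, List.map_cons, List.map_map]
      simp only [Nat.add_zero, List.singleton_append]
      congr 1
      apply List.map_congr_left
      intro k _
      simp only [Function.comp]
      congr 3
      omega

-- ===== VERDICT (by name: the statement is the Claim_ definition above) =====
theorem circular_path_spec : Claim_equal_circular_path := by
  unfold Claim_equal_circular_path Spec_circular_path
  intro n m _
  by_cases hn : n ≤ 0
  · have h0 : n.toNat = 0 := by omega
    unfold circular_path circular_path_alt
    rw [if_pos hn, h0]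
    rfl
  · have hnpos : 0 < n := by omega
    set gN := Int.gcd n m with hgdef
    have hgpos : 0 < gN := by
      have : gN ≠ 0 := by
        intro h0
        rw [hgdef, Int.gcd_eq_zero_iff] at h0
        obtain ⟨h01, h02⟩ := h0
        omega
      omega
    have hgdvd : gN ∣ n.toNat := by
      have h := Int.gcd_dvd_left (a := n) (b := m)
      rw [← Int.natAbs_dvd_natAbs] at h
      simp only [Int.natAbs_natCast] at h
      have h3 : n.natAbs = n.toNat := by omega
      rw [h3] at h
      rw [hgdef]
      exact h
    set LN := n.toNat / gN with hLdef
    have hLpos : 0 < LN := Nat.div_pos (Nat.le_of_dvd (by omega) hgdvd) hgpos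
    have hLle : LN ≤ n.toNat := Nat.div_le_self _ _
    -- B's gcd value
    have hmn : PySem.Int.mod m n = m % n := PySem.Int.mod_eq_emod_of_pos hnpos
    have heuc : circEuclid n (m % n) = (gN : Int) := by
      rw [circEuclid_eq_gcd (m % n).natAbs n (m % n) (le_of_lt hnpos)
        (Int.emod_nonneg m (by omega)) le_rfl]
      rw [Int.gcd_comm n (m % n), Int.gcd_emod m n, Int.gcd_comm m n, ← hgdef]
    -- B's range bound
    have hmul : n = (gN : Int) * (LN : Int) := by
      obtain ⟨c, hc⟩ := hgdvd
      have hLc : LN = c := by rw [hLdef, hc]; exact Nat.mul_div_cancel_left c hgpos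
      have h5 : (n.toNat : Int) = (gN : Int) * (c : Int) := by exact_mod_cast hc
      rw [Int.toNat_of_nonneg (le_of_lt hnpos)] at h5
      rw [hLc]
      exact h5
    have hdiv : n / (gN : Int) = (LN : Int) := by
      rw [hmul, Int.mul_ediv_cancel_left _ (by exact_mod_cast hgpos.ne')]
    -- A's list
    have hA := circPathGo_eq n m hnpos LN (by rw [hLdef, hgdef]) n.toNat 0 [] hLpos (by omega)
    simp only [Nat.cast_zero, zero_mul, Int.zero_emod, Nat.sub_zero, List.nil_append,
      Nat.zero_add] at hA
    unfold circular_path circular_path_alt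
    rw [if_neg (by omega : ¬ n ≤ 0)]
    simp only [hmn, heuc]
    rw [PySem.Int.floordiv_eq_ediv_of_pos (by exact_mod_cast hgpos : (0:Int) < (gN : Int)),
      hdiv, hA]
    rw [PySem.List.pyRange_one 0 (LN : Int)]
    simp only [sub_zero, Int.toNat_natCast]
    congr 1
    rw [List.map_map, List.map_map]
    apply List.map_congr_left
    intro k _
    simp [Function.comp, PySem.Int.mod_eq_emod_of_pos hnpos]
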